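-- pv_equiv track=rewrite | github.com/oalktb/Network-Programming | A2.py | __group_cmds
-- ===== SOURCE A (Python) =====
-- def __group_cmds(commands):
--     grouped_cmds = []
--     current_group = []
--
--     for cmd in commands:
--         if cmd.startswith('$') and cmd.endswith('$'):
--             if current_group:
--                 grouped_cmds.append(current_group)
--             current_group = [cmd]
--         else:
--             current_group.append(cmd)
--     if current_group:
--         grouped_cmds.append(current_group)
--
--     return grouped_cmds
-- ===== SOURCE B (Python) =====
-- def _is_header(cmd):
--     return cmd.startswith('$') and cmd.endswith('$')
--
--
-- def __group_cmds(commands):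
--     # Staged: first compute all header positions, then cut the list at them.
--     idxs = [i for i, c in enumerate(commands) if _is_header(c)]
--     if not idxs:
--         return [list(commands)] if commands else []
--     bounds = (idxs if idxs[0] == 0 else [0] + idxs) + [len(commands)]
--     return [commands[a:b] for a, b in zip(bounds, bounds[1:])]
-- ===== Notes on version B (the rewrite author's own statement) =====
-- stated objective: alternative
-- what changed: Replaces A's single accumulator-carrying pass with a staged computation: first collect the header indices, then derive the cut boundaries and emit each group as a slice between consecutive boundaries.
import Mathlib
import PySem

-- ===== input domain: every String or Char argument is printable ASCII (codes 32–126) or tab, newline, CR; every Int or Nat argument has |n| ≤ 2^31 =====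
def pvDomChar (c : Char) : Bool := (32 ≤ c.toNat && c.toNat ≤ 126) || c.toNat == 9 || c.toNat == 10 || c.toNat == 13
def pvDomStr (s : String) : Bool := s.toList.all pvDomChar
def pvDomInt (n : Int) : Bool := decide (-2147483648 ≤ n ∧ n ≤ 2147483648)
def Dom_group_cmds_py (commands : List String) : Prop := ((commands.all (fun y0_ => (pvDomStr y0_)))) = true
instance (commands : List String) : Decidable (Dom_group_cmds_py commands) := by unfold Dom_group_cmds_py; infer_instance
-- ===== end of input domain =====

-- B replaces A's accumulator-carrying single pass with a staged computation:
-- collect the header indices first, then cut the list into slices between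
-- consecutive boundaries; an alternative decomposition, same cost.

-- ===== PORT A =====
-- cmd.startswith('$') and cmd.endswith('$')
def pvIsHeader (cmd : String) : Bool :=
  PySem.Str.startswith cmd "$" && PySem.Str.endswith cmd "$"

-- literal port of A's loop: state = (grouped_cmds, current_group), appended at the end
def group_cmds_py (commands : List String) : List (List String) :=
  let st := commands.foldl
    (fun (st : List (List String) × List String) cmd =>
      if pvIsHeader cmd then
        (if st.2 ≠ [] then st.1 ++ [st.2] else st.1, [cmd])
      else
        (st.1, st.2 ++ [cmd]))
    ([], [])
  if st.2 ≠ [] then st.1 ++ [st.2] else st.1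

-- ===== PORT B =====
-- Source B step by step: the comprehension over enumerate is filterMap over
-- PySem.List.enumerate; zip(bounds, bounds[1:]) is bounds.zip bounds.tail;
-- commands[a:b] is PySem.List.slice (exact on these in-range bounds)
def group_cmds_py_alt (commands : List String) : List (List String) :=
  let idxs := (PySem.List.enumerate commands 0).filterMap
    (fun p => if pvIsHeader p.2 then some p.1 else none)
  match idxs with
  | [] => if commands ≠ [] then [commands] else []
  | i0 :: _ =>
    let bounds := (if i0 == 0 then idxs else 0 :: idxs) ++ [(commands.length : Int)]
    (bounds.zip bounds.tail).map (fun p => PySem.List.slice commands (some p.1) (some p.2))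

-- ===== PRECONDITION & SPEC =====
def Spec_group_cmds_py (commands : List String) (out : List (List String)) : Prop := out = group_cmds_py_alt commands
instance (commands : List String) (out : List (List String)) : Decidable (Spec_group_cmds_py commands out) := by unfold Spec_group_cmds_py; infer_instance

-- ===== CLAIM (what is proved, stated in full; the proofs are below) =====
def Claim_equal_group_cmds_py : Prop := ∀ (commands : List String), Dom_group_cmds_py commands → Spec_group_cmds_py commands (group_cmds_py commands)

-- ===== LEMMAS AND PROOFS =====

-- proof-side, accumulator-free view of A: the groups starting at `first`
def pvGroupsFrom (first : String) (rest : List String) : List (List String) :=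
  let seg := rest.takeWhile (fun c => !pvIsHeader c)
  match h : rest.dropWhile (fun c => !pvIsHeader c) with
  | [] => [first :: seg]
  | x :: t => (first :: seg) :: pvGroupsFrom x t
termination_by rest.length
decreasing_by
  have h1 : (rest.dropWhile (fun c => !pvIsHeader c)).length ≤ rest.length :=
    List.length_dropWhile_le _ _
  rw [h] at h1; simp at h1; omega

-- groups produced when the pending (non-empty) current group is `cur`
def pvGroupsCat (cur : List String) (rest : List String) : List (List String) :=
  let seg := rest.takeWhile (fun c => !pvIsHeader c)
  match rest.dropWhile (fun c => !pvIsHeader c) with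
  | [] => [cur ++ seg]
  | x :: t => (cur ++ seg) :: pvGroupsFrom x t

def pvStep (st : List (List String) × List String) (cmd : String) : List (List String) × List String :=
  if pvIsHeader cmd then
    (if st.2 ≠ [] then st.1 ++ [st.2] else st.1, [cmd])
  else
    (st.1, st.2 ++ [cmd])

def pvFinish (st : List (List String) × List String) : List (List String) :=
  if st.2 ≠ [] then st.1 ++ [st.2] else st.1

lemma pvGroupsFrom_eq_cat (first : String) (rest : List String) :
    pvGroupsFrom first rest = pvGroupsCat [first] rest := by
  unfold pvGroupsFrom pvGroupsCat
  rcases h : rest.dropWhile (fun c => !pvIsHeader c) with _ | ⟨x, t⟩ <;> simp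

lemma pvGroupsCat_cons (cur : List String) (h : String) (t : List String) :
    pvGroupsCat cur (h :: t) =
      if pvIsHeader h then cur :: pvGroupsFrom h t
      else pvGroupsCat (cur ++ [h]) t := by
  by_cases hh : pvIsHeader h
  · rw [pvGroupsCat, if_pos hh]
    simp [List.dropWhile_cons, hh]
  · rw [pvGroupsCat, pvGroupsCat, if_neg hh]
    simp [List.dropWhile_cons, hh, List.append_assoc]

lemma pvLoop (rest : List String) :
    ∀ (g : List (List String)) (cur : List String), cur ≠ [] →
      pvFinish (rest.foldl pvStep (g, cur)) = g ++ pvGroupsCat cur rest := by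
  induction rest with
  | nil =>
      intro g cur hc
      simp [pvFinish, pvGroupsCat, hc]
  | cons h t ih =>
      intro g cur hc
      by_cases hh : pvIsHeader h
      · have : pvStep (g, cur) h = (g ++ [cur], [h]) := by
          simp [pvStep, hh, hc]
        rw [List.foldl_cons, this, ih (g ++ [cur]) [h] (by simp),
          pvGroupsCat_cons, if_pos hh, pvGroupsFrom_eq_cat]
        simp
      · have : pvStep (g, cur) h = (g, cur ++ [h]) := by
          simp [pvStep, hh]
        rw [List.foldl_cons, this, ih g (cur ++ [h]) (by simp),
          pvGroupsCat_cons, if_neg hh]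

-- A (c :: t) = pvGroupsFrom c t
lemma pvA_eq_groupsFrom (c : String) (t : List String) :
    group_cmds_py (c :: t) = pvGroupsFrom c t := by
  show pvFinish ((c :: t).foldl pvStep ([], [])) = pvGroupsFrom c t
  have h0 : pvStep ([], []) c = ([], [c]) := by
    by_cases hh : pvIsHeader c <;> simp [pvStep, hh]
  rw [List.foldl_cons, h0, pvLoop t [] [c] (by simp), pvGroupsFrom_eq_cat]
  simp

-- proof-side name for B's first stage (definitionally what the port computes, at any start)
def pvIdxF (t : List String) (s : Int) : List Int :=
  (PySem.List.enumerate t s).filterMap (fun p => if pvIsHeader p.2 then some p.1 else none)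

-- and for B's last stage
def pvSliceMap (xs : List String) (bs : List Int) : List (List String) :=
  (bs.zip bs.tail).map (fun p => PySem.List.slice xs (some p.1) (some p.2))

lemma pvIdxF_nil (s : Int) : pvIdxF [] s = [] := by
  simp [pvIdxF, PySem.List.enumerate_nil]

lemma pvIdxF_cons (a : String) (t : List String) (s : Int) :
    pvIdxF (a :: t) s = (if pvIsHeader a then [s] else []) ++ pvIdxF t (s + 1) := by
  by_cases hh : pvIsHeader a <;>
    simp [pvIdxF, PySem.List.enumerate_cons, hh]

lemma pvIdxF_shift (t : List String) : ∀ (s : Int),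
    pvIdxF t s = (pvIdxF t 0).map (· + s) := by
  induction t with
  | nil => intro s; simp [pvIdxF_nil]
  | cons a t ih =>
      intro s
      rw [pvIdxF_cons, pvIdxF_cons, ih (s + 1), ih (0 + 1)]
      by_cases hh : pvIsHeader a <;>
        simp [hh, List.map_map, Function.comp_def, Int.add_comm, Int.add_left_comm]

lemma pvIdxF_append (u v : List String) (s : Int) :
    pvIdxF (u ++ v) s = pvIdxF u s ++ pvIdxF v (s + u.length) := by
  simp [pvIdxF, PySem.List.enumerate_append, List.filterMap_append]

lemma pvIdxF_eq_nil_iff (t : List String) (s : Int) :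
    pvIdxF t s = [] ↔ ∀ x ∈ t, ¬ pvIsHeader x := by
  induction t generalizing s with
  | nil => simp [pvIdxF_nil]
  | cons a t ih =>
      rw [pvIdxF_cons]
      by_cases hh : pvIsHeader a <;> simp [hh, ih (s + 1)]

lemma pvIdxF_nonneg (t : List String) : ∀ j ∈ pvIdxF t 0, 0 ≤ j := by
  induction t with
  | nil => simp [pvIdxF_nil]
  | cons a t ih =>
      intro j hj
      rw [pvIdxF_cons, pvIdxF_shift t (0 + 1)] at hj
      rcases List.mem_append.mp hj with h | h
      · split at h <;> simp_all
      · obtain ⟨k, hk, rfl⟩ := List.mem_map.mp h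
        have := ih k hk; omega

-- zip-with-tail over a mapped list
lemma pvZipTail_map {α β : Type} (f : α → β) (bs : List α) :
    (bs.map f).zip (bs.map f).tail = (bs.zip bs.tail).map (Prod.map f f) := by
  rw [← List.map_tail, List.zip_map]

-- slicing with bounds shifted past a prefix of the list
lemma pvSliceMap_shift (u v : List String) (bs : List Int)
    (hnn : ∀ b ∈ bs, 0 ≤ b) :
    pvSliceMap (u ++ v) (bs.map (· + (u.length : Int))) = pvSliceMap v bs := by
  unfold pvSliceMap
  rw [pvZipTail_map, List.map_map]
  apply List.map_congr_left
  intro p hp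
  obtain ⟨x, y⟩ := p
  obtain ⟨h1, h2'⟩ := List.of_mem_zip hp
  have h2 : y ∈ bs := List.mem_of_mem_tail h2'
  have ha := hnn _ h1
  have hb := hnn _ h2
  simp only [Function.comp_def, Prod.map]
  rw [PySem.List.slice_toNat _ ha hb,
    PySem.List.slice_toNat _ (by omega : (0:Int) ≤ x + (u.length : Int))
      (by omega : (0:Int) ≤ y + (u.length : Int))]
  have h4 : (y + (u.length : Int)).toNat - (x + (u.length : Int)).toNat
      = y.toNat - x.toNat := by omega
  have h3 : (x + (u.length : Int)).toNat = u.length + x.toNat := by omega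
  rw [h4, h3, ← List.drop_drop, List.drop_left]

lemma pvSliceAll (c : String) (t : List String) (b : Int)
    (hb : (t.length : Int) + 1 ≤ b) :
    PySem.List.slice (c :: t) none (some b) = c :: t := by
  rw [PySem.List.slice_to _ (by omega : (0:Int) ≤ b)]
  apply List.take_of_length_le
  simp
  omega

lemma pvGroupsFrom_nil (c : String) (t : List String)
    (h : t.dropWhile (fun c => !pvIsHeader c) = []) :
    pvGroupsFrom c t = [c :: t.takeWhile (fun c => !pvIsHeader c)] := by
  rw [pvGroupsFrom]
  split <;> simp_all

lemma pvGroupsFrom_cons (c x : String) (t t2 : List String)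
    (h : t.dropWhile (fun c => !pvIsHeader c) = x :: t2) :
    pvGroupsFrom c t = (c :: t.takeWhile (fun c => !pvIsHeader c)) :: pvGroupsFrom x t2 := by
  rw [pvGroupsFrom]
  split <;> simp_all

-- MAIN: B's slice stage over the uniform boundary list computes pvGroupsFrom
lemma pvSlice_eq_groupsFrom (n : Nat) : ∀ (t : List String) (c : String), t.length ≤ n →
    pvSliceMap (c :: t) ((0 :: (pvIdxF t 0).map (· + 1)) ++ [((t.length : Int) + 1)])
      = pvGroupsFrom c t := by
  induction n with
  | zero =>
      intro t c hle
      have ht : t = [] := List.eq_nil_of_length_eq_zero (Nat.le_zero.mp hle)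
      subst ht
      rw [pvGroupsFrom_nil c [] (by simp)]
      simp [pvSliceMap, pvIdxF_nil]
      exact pvSliceAll c [] 1 (by simp)
  | succ n ih =>
      intro t c hle
      rcases hI : pvIdxF t 0 with _ | ⟨j, js⟩
      · -- no header anywhere in t: one big slice = the whole list
        have hall : ∀ x ∈ t, ¬ pvIsHeader x := (pvIdxF_eq_nil_iff t 0).mp hI
        have hdw : t.dropWhile (fun c => !pvIsHeader c) = [] := by
          rw [List.dropWhile_eq_nil_iff]; simp_all
        have htw : t.takeWhile (fun c => !pvIsHeader c) = t := by
          have := List.takeWhile_append_dropWhile (p := fun c => !pvIsHeader c) (l := t)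
          rw [hdw] at this; simpa using this
        rw [pvGroupsFrom_nil c t hdw, htw]
        simp [pvSliceMap]
        exact pvSliceAll c t _ le_rfl
      · -- first header at position j: t = seg ++ x :: t2
        have hdw : t.dropWhile (fun c => !pvIsHeader c) ≠ [] := by
          rw [Ne, List.dropWhile_eq_nil_iff]
          intro hall
          have : pvIdxF t 0 = [] := by
            rw [pvIdxF_eq_nil_iff]; intro x hx; simpa using hall x hx
          rw [this] at hI
          exact List.cons_ne_nil j js hI.symm
        obtain ⟨x, t2, hx⟩ : ∃ x t2, t.dropWhile (fun c => !pvIsHeader c) = x :: t2 := by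
          cases h : t.dropWhile (fun c => !pvIsHeader c) with
          | nil => exact absurd h hdw
          | cons x t2 => exact ⟨x, t2, rfl⟩
        set seg := t.takeWhile (fun c => !pvIsHeader c) with hseg
        have hsplit : t = seg ++ x :: t2 := by
          rw [hseg, ← hx, List.takeWhile_append_dropWhile]
        have hsegall : ∀ y ∈ seg, ¬ pvIsHeader y := by
          intro y hy
          have := List.mem_takeWhile_imp (hseg ▸ hy)
          simpa using this
        have hxhdr : pvIsHeader x := by
          have hw : t.dropWhile (fun c => !pvIsHeader c) ≠ [] := by rw [hx]; simp
          have h := List.head_dropWhile_not (fun c => !pvIsHeader c) hw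
          have hhead : (t.dropWhile (fun c => !pvIsHeader c)).head hw = x := by
            simp only [hx, List.head_cons]
          rw [hhead] at h
          simpa using h
        -- idxs of t: seg.length, then idxs of t2 shifted by seg.length + 1
        have hIdx : pvIdxF t 0 = ((seg.length : Int)) ::
            (pvIdxF t2 0).map (· + ((seg.length : Int) + 1)) := by
          rw [hsplit, pvIdxF_append, (pvIdxF_eq_nil_iff seg 0).mpr hsegall,
            pvIdxF_cons, if_pos hxhdr, pvIdxF_shift t2 ((0 : Int) + seg.length + 1)]
          simp [List.map_map, Function.comp_def, Int.add_comm, Int.add_left_comm]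
        have hlen2 : t2.length ≤ n := by
          have := congrArg List.length hsplit
          simp at this; omega
        -- peel the first group (the slice commands[0 : seg.length+1] = c :: seg)
        rw [pvGroupsFrom_cons c x t t2 hx, ← hseg, ← hI, hIdx]
        have hlen : (t.length : Int) + 1
            = ((t2.length : Int) + 1) + ((seg.length : Int) + 1) := by
          have := congrArg List.length hsplit
          simp at this; push_cast [this]; ring
        -- rewrite the boundary list as a shifted copy of t2's boundary list, prefixed by 0
        have hbounds : ((0 :: (((seg.length : Int)) ::
              (pvIdxF t2 0).map (· + ((seg.length : Int) + 1))).map (· + 1))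
              ++ [((t.length : Int) + 1)])
            = 0 :: (((0 :: (pvIdxF t2 0).map (· + 1)) ++ [((t2.length : Int) + 1)]).map
                (· + ((seg.length : Int) + 1))) := by
          simp [List.map_map, Function.comp_def, hlen, Int.add_comm, Int.add_left_comm,
            Int.add_assoc]
        rw [hbounds]
        -- first slice + shifted remainder
        have hcons : ∀ (b : Int) (rest : List Int),
            pvSliceMap (c :: t) (0 :: b :: rest)
            = PySem.List.slice (c :: t) (some 0) (some b) :: pvSliceMap (c :: t) (b :: rest) := by
          intro b rest; simp [pvSliceMap]
        rcases hb2 : ((0 :: (pvIdxF t2 0).map (· + 1)) ++ [((t2.length : Int) + 1)]).map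
            (· + ((seg.length : Int) + 1)) with _ | ⟨b, rest⟩
        · simp at hb2
        rw [hb2, hcons b rest]
        -- the first slice is c :: seg
        have hfirst : b = (seg.length : Int) + 1 := by
          have h := congrArg (fun l => l.head?) hb2
          simp at h
          omega
        have hslice1 : PySem.List.slice (c :: t) (some 0) (some b) = c :: seg := by
          rw [hfirst]
          have : ((seg.length : Int) + 1) = (((seg.length + 1 : Nat) : Int)) := by push_cast; ring
          rw [this, show (0 : Int) = ((0 : Nat) : Int) by simp, PySem.List.slice_natCast]
          rw [hsplit]
          simp [List.take_append]
        -- the remaining slices: shift past the prefix c :: seg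
        have hnn : ∀ y ∈ (0 :: (pvIdxF t2 0).map (· + 1)) ++ [((t2.length : Int) + 1)], 0 ≤ y := by
          intro y hy
          rcases List.mem_append.mp hy with h | h
          · rcases List.mem_cons.mp h with rfl | h
            · exact le_refl 0
            · obtain ⟨k, hk, rfl⟩ := List.mem_map.mp h
              have := pvIdxF_nonneg t2 k hk; omega
          · simp at h; omega
        have hshift : pvSliceMap (c :: t) (b :: rest) = pvGroupsFrom x t2 := by
          rw [← hb2]
          have hpre : (c :: t) = (c :: seg) ++ (x :: t2) := by rw [hsplit]; simp
          have hplen : ((c :: seg).length : Int) = (seg.length : Int) + 1 := by simp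
          rw [hpre, ← hplen, pvSliceMap_shift (c :: seg) (x :: t2) _ hnn,
            ih t2 x hlen2]
        rw [hslice1, hshift]
  -- end main

-- B itself equals the uniform boundary-list form (case analysis on B's branches)
lemma pvB_eq_slice (c : String) (t : List String) :
    group_cmds_py_alt (c :: t)
      = pvSliceMap (c :: t) ((0 :: (pvIdxF t 0).map (· + 1)) ++ [((t.length : Int) + 1)]) := by
  have hidx : (PySem.List.enumerate (c :: t) 0).filterMap
      (fun p => if pvIsHeader p.2 then some p.1 else none)
      = (if pvIsHeader c then [(0 : Int)] else []) ++ (pvIdxF t 0).map (· + 1) := by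
    have := pvIdxF_cons c t 0
    rw [pvIdxF_shift t (0 + 1)] at this
    simpa [pvIdxF] using this
  unfold group_cmds_py_alt
  rw [hidx]
  by_cases hh : pvIsHeader c
  · -- idxs = 0 :: …, i0 = 0, bounds = idxs ++ [len]
    simp only [hh, if_true, List.singleton_append]
    have hlen : ((c :: t).length : Int) = (t.length : Int) + 1 := by simp
    simp [pvSliceMap, hlen]
  · simp only [hh, if_false, List.nil_append]
    rcases hI : (pvIdxF t 0) with _ | ⟨j, js⟩
    · -- no headers at all: B returns [commands]; uniform form gives one full slice
      simp [pvSliceMap]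
      exact (pvSliceAll c t _ le_rfl).symm
    · -- headers exist but c is not one: i0 = j+1 > 0, bounds = 0 :: idxs ++ [len]
      have hj : 0 ≤ j := pvIdxF_nonneg t j (by rw [hI]; exact List.mem_cons_self)
      have hne : ¬ (j + 1 = (0 : Int)) := by omega
      simp [pvSliceMap, hne, List.cons_append, beq_iff_eq]

-- ===== VERDICT (by name: the statement is the Claim_ definition above) =====
theorem group_cmds_py_spec : Claim_equal_group_cmds_py := by
  intro commands _
  unfold Spec_group_cmds_py
  cases commands with
  | nil => simp [group_cmds_py, group_cmds_py_alt, PySem.List.enumerate_nil]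
  | cons c t =>
      rw [pvA_eq_groupsFrom, pvB_eq_slice,
        pvSlice_eq_groupsFrom t.length t c le_rfl]
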